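-- pv_equiv track=rewrite | github.com/j-kyung99/Python-codingtest | 프로그래머스/1/135808. 과일 장수/과일 장수.py | solution
-- ===== SOURCE A (Python) =====
-- def solution(k, m, score):
--     answer = 0
--     score.sort(reverse=True)
--     arr = []
--     for i in range(len(score)):
--         if len(arr) < m:
--             arr.append(score[i])
--         if len(arr) == m:
--             answer += min(arr) * m
--             arr.clear()
--     return answer
-- ===== SOURCE B (Python) =====
-- def solution(k, m, score):
--     # sort in place (descending) like A; each full group's min sits at indices m-1, 2m-1, ...
--     score.sort(reverse=True)
--     return sum(score[i] for i in range(m - 1, len(score), m)) * m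
-- ===== Notes on version B (the rewrite author's own statement) =====
-- stated objective: simpler
-- what changed: Replaces A's running buffer with append/min/clear by a direct strided sum: after the in-place descending sort, each full group's minimum is the element at index m-1, 2m-1, ..., so B just sums score[i] for i in range(m-1, len(score), m) and multiplies by m.
-- outside the precondition, e.g. on solution(0, 0, []): A returns 0, B raises ValueError
import Mathlib
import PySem

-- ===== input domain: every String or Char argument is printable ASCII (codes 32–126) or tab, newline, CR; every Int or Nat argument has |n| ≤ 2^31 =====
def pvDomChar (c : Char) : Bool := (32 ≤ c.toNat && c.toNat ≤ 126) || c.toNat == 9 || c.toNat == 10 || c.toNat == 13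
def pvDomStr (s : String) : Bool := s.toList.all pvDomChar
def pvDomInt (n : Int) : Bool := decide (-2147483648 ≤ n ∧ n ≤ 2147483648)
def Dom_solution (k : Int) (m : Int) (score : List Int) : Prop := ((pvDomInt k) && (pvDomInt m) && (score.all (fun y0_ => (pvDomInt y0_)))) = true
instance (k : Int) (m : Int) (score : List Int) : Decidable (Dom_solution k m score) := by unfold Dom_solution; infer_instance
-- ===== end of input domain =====

-- B replaces A's running buffer + min + clear with a strided sum over the sorted list (simpler decomposition, same cost).
-- Both Pythons sort `score` in place; the equivalence proved here is about the return value.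


-- ===== PORT A =====
def solution (k : Int) (m : Int) (score : List Int) : Int :=
  let s := PySem.List.sorted score (fun x => x) true
  let st := (PySem.List.pyRange 0 s.length 1).foldl (fun (st : Int × List Int) i =>
    let arr := if (st.2.length : Int) < m then st.2 ++ [PySem.List.pyGetD s i 0] else st.2
    if (arr.length : Int) = m then
      (st.1 + ((PySem.List.min? arr (fun y => y)).getD 0) * m, ([] : List Int))
    else (st.1, arr)) (0, ([] : List Int))
  st.1

-- ===== PORT B =====
def solution_alt (k : Int) (m : Int) (score : List Int) : Int :=
  let s := PySem.List.sorted score (fun x => x) true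
  ((PySem.List.pyRange (m - 1) s.length m).foldl (fun acc i => acc + PySem.List.pyGetD s i 0) 0) * m

-- ===== PRECONDITION & SPEC =====
-- Pre_ excludes m = 0 only: there Python A raises ValueError (min of the empty buffer) on every
-- non-empty score, and on empty score A returns 0 while B's range(m-1, len, 0) raises ValueError.
def Pre_solution (k : Int) (m : Int) (score : List Int) : Prop := m ≠ 0
instance (k : Int) (m : Int) (score : List Int) : Decidable (Pre_solution k m score) := by unfold Pre_solution; infer_instance
def pvWitness_solution : Int × Int × List Int := (4, 3, [1, 2, 3, 1, 2, 3, 1])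
def Spec_solution (k : Int) (m : Int) (score : List Int) (out : Int) : Prop := out = solution_alt k m score
instance (k : Int) (m : Int) (score : List Int) (out : Int) : Decidable (Spec_solution k m score out) := by unfold Spec_solution; infer_instance

-- ===== CLAIM (what is proved, stated in full; the proofs are below) =====
def Claim_equal_solution : Prop := ∀ (k : Int) (m : Int) (score : List Int), Dom_solution k m score → Pre_solution k m score → Spec_solution k m score (solution k m score)

-- ===== LEMMAS AND PROOFS =====

-- the loop body of A's port, over the sorted list s, as a function of the current element
def bodyA (m : Int) (st : Int × List Int) (x : Int) : Int × List Int :=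
  let arr := if (st.2.length : Int) < m then st.2 ++ [x] else st.2
  if (arr.length : Int) = m then
    (st.1 + ((PySem.List.min? arr (fun y => y)).getD 0) * m, ([] : List Int))
  else (st.1, arr)

-- sum of s[M-1], s[2M-1], …: the last element of each full chunk of M
def strided (M : Nat) (s : List Int) : Int :=
  ((List.range (s.length / M)).map (fun k => s.getD (M * k + (M - 1)) 0)).sum

theorem min_append_last (arr : List Int) (x : Int) (h : ∀ a ∈ arr, x ≤ a) :
    ((PySem.List.min? (arr ++ [x]) (fun y => y)).getD 0) = x := by
  rcases hm : PySem.List.min? (arr ++ [x]) (fun y => y) with _ | mn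
  · rw [PySem.List.min?_eq_none_iff] at hm; simp at hm
  · have hmem := PySem.List.min?_mem hm
    have hmin := PySem.List.min?_isMin hm x (by simp)
    simp only [List.mem_append, List.mem_singleton] at hmem
    rcases hmem with hmem | rfl
    · have := h mn hmem
      simp only [Option.getD_some]; omega
    · simp

theorem strided_chunk (M : Nat) (hM : 1 ≤ M) (s : List Int) (h : M ≤ s.length) :
    strided M s = s.getD (M - 1) 0 + strided M (s.drop M) := by
  unfold strided
  have hq : s.length / M = (s.length - M) / M + 1 := by
    rw [Nat.div_eq_sub_div (by omega) h]
  rw [hq, List.range_succ_eq_map]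
  simp only [List.map_cons, List.map_map, List.sum_cons, Nat.mul_zero, Nat.zero_add]
  congr 1
  · simp [List.length_drop]
    congr 1
    apply List.map_congr_left
    intro k _
    simp only [Function.comp_apply]
    have hidx : M * k.succ + (M - 1) = M + (M * k + (M - 1)) := by
      have : M * k.succ = M * k + M := Nat.mul_succ M k
      omega
    rw [hidx]

theorem foldA_partial (M : Nat) (c : List Int) : ∀ (arr : List Int) (acc : Int),
    arr.length + c.length < M →
    c.foldl (bodyA (M : Int)) (acc, arr) = (acc, arr ++ c) := by
  induction c with
  | nil => intro arr acc _; simp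
  | cons x t ih =>
    intro arr acc hlen
    simp only [List.length_cons] at hlen
    have h1 : ((arr.length : Int) < (M : Int)) := by exact_mod_cast (by omega : arr.length < M)
    have h2 : ¬ (((arr ++ [x]).length : Int) = (M : Int)) := by
      simp only [List.length_append, List.length_singleton]
      exact_mod_cast (by omega : ¬ (arr.length + 1 = M))
    simp only [List.foldl_cons, bodyA, if_pos h1, if_neg h2]
    rw [ih (arr ++ [x]) acc (by simp; omega)]
    simp

theorem foldA_full (M : Nat) (c : List Int) : ∀ (arr : List Int) (acc : Int),
    arr.length + c.length = M → ∀ (hc : c ≠ []),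
    (∀ a ∈ arr, ∀ b ∈ c, b ≤ a) → c.Pairwise (· ≥ ·) →
    c.foldl (bodyA (M : Int)) (acc, arr) = (acc + (c.getLast hc) * M, ([] : List Int)) := by
  induction c with
  | nil => intro _ _ _ hc; exact absurd rfl hc
  | cons x t ih =>
    intro arr acc hlen hc hle hp
    rcases eq_or_ne t [] with rfl | ht
    · simp only [List.length_cons, List.length_nil] at hlen
      have h1 : ((arr.length : Int) < (M : Int)) := by exact_mod_cast (by omega : arr.length < M)
      have h2 : (((arr ++ [x]).length : Int) = (M : Int)) := by
        simp only [List.length_append, List.length_singleton]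
        exact_mod_cast (by omega : arr.length + 1 = M)
      simp only [List.foldl_cons, List.foldl_nil, bodyA, if_pos h1, if_pos h2]
      rw [min_append_last arr x (fun a ha => hle a ha x (by simp))]
      simp [List.getLast]
    · simp only [List.length_cons] at hlen
      have h1 : ((arr.length : Int) < (M : Int)) := by
        have := List.length_pos_iff.mpr ht
        exact_mod_cast (by omega : arr.length < M)
      have h2 : ¬ (((arr ++ [x]).length : Int) = (M : Int)) := by
        have := List.length_pos_iff.mpr ht
        simp only [List.length_append, List.length_singleton]
        exact_mod_cast (by omega : ¬ (arr.length + 1 = M))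
      simp only [List.foldl_cons, bodyA, if_pos h1, if_neg h2]
      rw [ih (arr ++ [x]) acc (by simp; omega) ht ?_ (List.Pairwise.sublist (by simp) hp)]
      · rw [List.getLast_cons ht]
      · intro a ha b hb
        simp only [List.mem_append, List.mem_singleton] at ha
        rcases ha with ha | rfl
        · exact hle a ha b (by simp [hb])
        · exact (List.pairwise_cons.mp hp).1 b hb

theorem foldA_main (M : Nat) (hM : 1 ≤ M) : ∀ (n : Nat) (s : List Int), s.length = n →
    s.Pairwise (· ≥ ·) → ∀ acc : Int,
    (s.foldl (bodyA (M : Int)) (acc, ([] : List Int))).1 = acc + strided M s * M := by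
  intro n
  induction n using Nat.strong_induction_on with
  | _ n ih =>
    intro s hn hp acc
    subst hn
    by_cases hsm : s.length < M
    · rw [foldA_partial M s [] acc (by simpa using hsm)]
      have h0 : s.length / M = 0 := Nat.div_eq_of_lt hsm
      simp [strided, h0]
    · push_neg at hsm
      have hne : s.take M ≠ [] := by
        apply List.ne_nil_of_length_pos
        simp only [List.length_take]
        omega
      conv_lhs => rw [← List.take_append_drop M s, List.foldl_append]
      rw [foldA_full M (s.take M) [] acc (by simp; omega) hne (by simp)
            (hp.sublist (List.take_sublist M s))]
      rw [ih (s.length - M) (by omega) (s.drop M) (by simp)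
            (hp.sublist (List.drop_sublist M s))]
      have hlast : (s.take M).getLast hne = s.getD (M - 1) 0 := by
        rw [List.getLast_eq_getElem]
        simp only [List.length_take, Nat.min_eq_left hsm]
        rw [List.getElem_take]
        rw [List.getD_eq_getElem s 0 (by omega : M - 1 < s.length)]
      rw [hlast, strided_chunk M hM s hsm]
      ring

theorem foldB_main (M : Nat) (hM : 1 ≤ M) (s : List Int) :
    ((PySem.List.pyRange ((M : Int) - 1) s.length M).foldl
      (fun acc i => acc + PySem.List.pyGetD s i 0) 0) = strided M s := by
  rw [PySem.List.pyRange_of_pos _ _ (by exact_mod_cast hM : (0:Int) < M)]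
  have hnum : ((s.length : Int) - ((M : Int) - 1) + (M : Int) - 1) = (s.length : Int) := by ring
  have hcount : (if ((M : Int) - 1) < (s.length : Int) then
      (((s.length : Int) - ((M : Int) - 1) + (M : Int) - 1) / (M : Int)).toNat else 0)
      = s.length / M := by
    rw [hnum]
    split_ifs with h
    · rw [← Int.natCast_div]; exact Int.toNat_natCast _
    · have : s.length < M := by omega
      rw [Nat.div_eq_of_lt this]
  rw [hcount, List.foldl_map, PySem.List.foldl_add, strided]
  rw [zero_add]
  congr 1
  apply List.map_congr_left
  intro k hk
  have hidx : ((M : Int) - 1 + (M : Int) * (k : Int)) = ((M * k + (M - 1) : Nat) : Int) := by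
    push_cast; omega
  rw [hidx, PySem.List.pyGetD_natCast]

-- A's port, written through bodyA over the sorted list (a fold over the same values)
theorem solutionA_eq (k m : Int) (score : List Int) :
    solution k m score
      = ((PySem.List.sorted score (fun x => x) true).foldl (bodyA m) (0, ([] : List Int))).1 := by
  unfold solution
  rw [show ((PySem.List.sorted score (fun x => x) true).foldl (bodyA m) (0, ([] : List Int)))
      = ((PySem.List.pyRange 0 ((PySem.List.sorted score (fun x => x) true).length : Int) 1).foldl
          (fun st j => bodyA m st (PySem.List.pyGetD (PySem.List.sorted score (fun x => x) true) j 0))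
          (0, ([] : List Int)))
    from (PySem.List.foldl_pyRange_zero_pyGetD' _ 0 (bodyA m) _).symm]
  rfl

-- ===== VERDICT (by name: the statement is the Claim_ definition above) =====
theorem solution_spec : Claim_equal_solution := by
  unfold Claim_equal_solution Pre_solution Spec_solution
  intro k m score _ hm
  have hB : solution_alt k m score
      = ((PySem.List.pyRange (m - 1) ((PySem.List.sorted score (fun x => x) true).length : Int) m).foldl
          (fun acc i => acc + PySem.List.pyGetD (PySem.List.sorted score (fun x => x) true) i 0) 0) * m := rfl
  rw [solutionA_eq, hB]
  set s : List Int := PySem.List.sorted score (fun x => x) true with hs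
  rcases lt_or_gt_of_ne hm with hneg | hpos
  · -- m < 0: A's loop never appends nor completes a group; B's range is empty
    have hbody : ∀ (st : Int × List Int) (x : Int), bodyA m st x = st := by
      intro st x
      have h1 : ¬ ((st.2.length : Int) < m) := by
        have := Int.natCast_nonneg st.2.length; omega
      simp only [bodyA, if_neg h1]
      have h2 : ¬ ((st.2.length : Int) = m) := by
        have := Int.natCast_nonneg st.2.length; omega
      simp only [if_neg h2]
    have hfold : List.foldl (bodyA m) ((0 : Int), ([] : List Int)) s = ((0 : Int), ([] : List Int)) := by
      rw [PySem.List.foldl_congr_mem s (bodyA m) (fun st _ => st) _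
            (fun acc x _ => hbody acc x)]
      exact PySem.List.foldl_ignore s _
    rw [hfold]
    have hR : PySem.List.pyRange (m - 1) (s.length : Int) m = [] := by
      unfold PySem.List.pyRange
      have h0 : ¬ (m = 0) := hm
      have h1 : ¬ ((0 : Int) < m) := by omega
      have h2 : ¬ ((s.length : Int) < m - 1) := by
        have := Int.natCast_nonneg s.length; omega
      simp [h0, h1, h2]
    rw [hR]
    simp
  · -- m ≥ 1
    obtain ⟨M, rfl⟩ : ∃ M : Nat, (M : Int) = m := ⟨m.toNat, Int.toNat_of_nonneg (by omega)⟩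
    have hM : 1 ≤ M := by exact_mod_cast hpos
    have hp : s.Pairwise (· ≥ ·) := by
      have h := PySem.List.sorted_pairwise_rev score (fun x => x)
      rw [← hs] at h
      exact h.imp (fun h' => h')
    rw [foldA_main M hM s.length s rfl hp 0, foldB_main M hM s]
    ring
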